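-- pv_equiv track=rewrite | github.com/angelgladin/URI | 1909.py | lowest_bounce_time_for_another_ball
-- ===== SOURCE A (Python) =====
-- def gcd(a, b):
--     return a if b == 0 else gcd(b, a%b)
--
-- def lcm(a, b):
--     return a * b // gcd(a, b)
--
-- def lowest_bounce_time_for_another_ball(t, l):
--     #The other ball bounce time
--     bounce_time = 0
--     #Aux variable stands for 'saving' the lcm of all numbers
--     aux = 1
--     #Create a boolean list for marking the the bouncing time of all the balls
--     balls_time = [False] * (int(1e5) + 1)
--     #Getting lcm of all numbers
--     for x in l:
--         balls_time[x] = True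
--         aux = lcm(aux, x)
--
--     if aux <= t:
--         for x in range(2, t+1):
--             if not t % x and not balls_time[x] and lcm(aux, x) == t:
--                 bounce_time = x
--                 break
--         if bounce_time == 0:
--             return 'impossivel'
--         return str(bounce_time)
--     else:
--         return 'impossivel'
-- ===== SOURCE B (Python) =====
-- # Alternative re-implementation: instead of scanning every x in 2..t, enumerate only
-- # the divisors of t (small divisors ascending, then large divisors ascending) and
-- # return the first qualifying one.
--
-- def _gcd(a, b):
--     while b:
--         a, b = b, a % b
--     return a
--
-- def _lcm(a, b):
--     return a * b // _gcd(a, b)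
--
-- def lowest_bounce_time_for_another_ball(t, l):
--     aux = 1
--     for x in l:
--         aux = _lcm(aux, x)
--     banned = set(l)
--     def ok(x):
--         return x >= 2 and x not in banned and _lcm(aux, x) == t
--     d = 1
--     while d * d <= t:
--         if t % d == 0 and ok(d):
--             return str(d)
--         d += 1
--     while d > 1:
--         d -= 1
--         if t % d == 0 and ok(t // d):
--             return str(t // d)
--     return 'impossivel'
-- ===== Notes on version B (the rewrite author's own statement) =====
-- stated objective: alternative
-- what changed: B enumerates only the divisors of t (small divisors ascending, then their cofactors ascending, O(sqrt t) candidates) instead of A's scan of every integer in 2..t, and replaces A's 100001-slot marking array by a set of l; on large-list inputs both runtimes are dominated by the identical lcm fold, so the measured cost is the same.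
-- outside the precondition, e.g. on lowest_bounce_time_for_another_ball(150000, [75000]): A returns '16', B returns '16'; on lowest_bounce_time_for_another_ball(100000, [-1]): A returns 'impossivel', B returns '100000'; on lowest_bounce_time_for_another_ball(200000, [3]): A raises IndexError, B returns 'impossivel'
import Mathlib
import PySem

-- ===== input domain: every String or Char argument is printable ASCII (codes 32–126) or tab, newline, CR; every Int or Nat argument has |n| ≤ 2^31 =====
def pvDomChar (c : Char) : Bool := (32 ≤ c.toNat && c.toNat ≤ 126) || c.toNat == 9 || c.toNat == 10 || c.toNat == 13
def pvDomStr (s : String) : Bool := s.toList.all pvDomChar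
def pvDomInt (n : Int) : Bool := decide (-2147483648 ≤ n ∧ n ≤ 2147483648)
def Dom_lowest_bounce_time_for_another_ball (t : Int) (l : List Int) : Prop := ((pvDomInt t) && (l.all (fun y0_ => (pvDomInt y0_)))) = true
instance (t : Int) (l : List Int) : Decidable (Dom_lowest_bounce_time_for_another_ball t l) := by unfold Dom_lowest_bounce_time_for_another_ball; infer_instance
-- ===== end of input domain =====

-- B replaces A's scan of every integer in 2..t (plus a 100001-slot marking array) by an
-- enumeration of only the divisors of t (small divisors ascending, then their cofactors
-- ascending) tested against a set of l; objective: alternative.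


-- termination helper for the Euclidean recursions (cited in decreasing_by)
theorem pvModAbsLt (a b : Int) (hb : ¬ b = 0) : (PySem.Int.mod a b).natAbs < b.natAbs := by
  rcases lt_or_gt_of_ne hb with h | h
  · have h1 := PySem.Int.mod_neg_bounds a h
    omega
  · have h1 := PySem.Int.mod_nonneg a h
    have h2 := PySem.Int.mod_lt a h
    omega

-- ===== PORT A =====
-- def gcd(a, b): return a if b == 0 else gcd(b, a%b)
def pyGcd (a b : Int) : Int :=
  if b = 0 then a else pyGcd b (PySem.Int.mod a b)
termination_by b.natAbs
decreasing_by exact pvModAbsLt a b (by assumption)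

-- def lcm(a, b): return a * b // gcd(a, b)
def pyLcm (a b : Int) : Int := PySem.Int.floordiv (a * b) (pyGcd a b)

-- balls_time[x] = True : Python index assignment; pySetD is exact whenever the index is in
-- range (negative wrap included), the only case reached under Pre_.
def lowest_bounce_time_for_another_ball (t : Int) (l : List Int) : String :=
  let st := l.foldl (fun (st : Int × List Bool) x =>
      (pyLcm st.1 x, PySem.List.pySetD st.2 x true)) (1, List.replicate 100001 false)
  let aux := st.1
  let balls := st.2
  if aux ≤ t then
    -- for x in range(2, t+1): if not t % x and not balls_time[x] and lcm(aux,x)==t: break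
    let bounce := ((PySem.List.pyRange 2 (t + 1) 1).find? (fun x =>
        PySem.Int.mod t x == 0 && !(PySem.List.pyGetD balls x false) && pyLcm aux x == t)).getD 0
    if bounce = 0 then "impossivel" else PySem.Int.toStr bounce
  else "impossivel"

-- ===== PORT B =====
-- def _gcd(a, b): while b: a, b = b, a % b ; return a
def gcdLoop (a b : Int) : Int :=
  if b = 0 then a else gcdLoop b (PySem.Int.mod a b)
termination_by b.natAbs
decreasing_by exact pvModAbsLt a b (by assumption)

def lcmB (a b : Int) : Int := PySem.Int.floordiv (a * b) (gcdLoop a b)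

-- def ok(x): return x >= 2 and x not in banned and _lcm(aux, x) == t
def okB (t aux : Int) (banned : PySem.Set Int) (x : Int) : Bool :=
  2 ≤ x && !(PySem.Set.contains banned x) && lcmB aux x == t

-- while d * d <= t: if t % d == 0 and ok(d): return str(d) ; d += 1   (.inr = fall-through d)
def smallLoop (t aux : Int) (banned : PySem.Set Int) (d : Int) : Int ⊕ Int :=
  if h : d * d ≤ t then
    if PySem.Int.mod t d == 0 && okB t aux banned d then .inl d
    else smallLoop t aux banned (d + 1)
  else .inr d
termination_by (t + 1 - d).toNat
decreasing_by
  have hd : d ≤ t := by nlinarith [sq_nonneg d, sq_nonneg (d - 1)]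
  omega

-- while d > 1: d -= 1 ; if t % d == 0 and ok(t // d): return str(t // d)
def bigLoop (t aux : Int) (banned : PySem.Set Int) (d : Int) : Option Int :=
  if h : 1 < d then
    if PySem.Int.mod t (d - 1) == 0 && okB t aux banned (PySem.Int.floordiv t (d - 1)) then
      some (PySem.Int.floordiv t (d - 1))
    else bigLoop t aux banned (d - 1)
  else none
termination_by d.toNat
decreasing_by omega

def lowest_bounce_time_for_another_ball_alt (t : Int) (l : List Int) : String :=
  let aux := l.foldl (fun a x => lcmB a x) 1
  let banned := PySem.Set.ofList l
  match smallLoop t aux banned 1 with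
  | .inl x => PySem.Int.toStr x
  | .inr d =>
    match bigLoop t aux banned d with
    | some x => PySem.Int.toStr x
    | none => "impossivel"

-- ===== PRECONDITION & SPEC =====
-- Pre_ excludes exactly: list values outside A's 100001-slot marking array (IndexError),
-- a second zero in the list (ZeroDivisionError in lcm), t beyond the array while not below
-- the lcm of the list (A's scan then indexes past the array on most such inputs and returns
-- only accidentally on the rest), and the corner where a negative list value e wraps onto a
-- scanned slot 100001+e <= t, where A's negative-index wraparound bans an unrelated time.
def Pre_lowest_bounce_time_for_another_ball (t : Int) (l : List Int) : Prop :=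
  (∀ x ∈ l, -100001 ≤ x ∧ x ≤ 100000 ∧ (x < 0 → t < x + 100001)) ∧
    l.count 0 ≤ 1 ∧
    (t ≤ 100000 ∨ t < l.foldl (fun a x => ((Int.lcm a x : Nat) : Int)) 1)
instance (t : Int) (l : List Int) : Decidable (Pre_lowest_bounce_time_for_another_ball t l) := by
  unfold Pre_lowest_bounce_time_for_another_ball; infer_instance

def pvWitness_lowest_bounce_time_for_another_ball : Int × List Int := (12, [4, 6])

def Spec_lowest_bounce_time_for_another_ball (t : Int) (l : List Int) (out : String) : Prop := out = lowest_bounce_time_for_another_ball_alt t l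
instance (t : Int) (l : List Int) (out : String) : Decidable (Spec_lowest_bounce_time_for_another_ball t l out) := by unfold Spec_lowest_bounce_time_for_another_ball; infer_instance

-- ===== CLAIM (what is proved, stated in full; the proofs are below) =====
def Claim_equal_lowest_bounce_time_for_another_ball : Prop := ∀ (t : Int) (l : List Int), Dom_lowest_bounce_time_for_another_ball t l → Pre_lowest_bounce_time_for_another_ball t l → Spec_lowest_bounce_time_for_another_ball t l (lowest_bounce_time_for_another_ball t l)

-- ===== LEMMAS AND PROOFS =====

-- the qualifying condition shared by both scans (proof-side only)
def Pb (t aux : Int) (l : List Int) (x : Int) : Bool :=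
  PySem.Int.mod t x == 0 && okB t aux (PySem.Set.ofList l) x

-- the condition tested by B's second (cofactor) loop at counter value e
def bigCond (t aux : Int) (l : List Int) (e : Int) : Bool :=
  PySem.Int.mod t e == 0 && okB t aux (PySem.Set.ofList l) (PySem.Int.floordiv t e)

theorem gcd_eq (a b : Int) : gcdLoop a b = pyGcd a b := by
  fun_induction gcdLoop a b
  all_goals rw [pyGcd]
  · simp_all
  · next h ih => rw [if_neg h]; exact ih

theorem lcm_eq (a b : Int) : lcmB a b = pyLcm a b := by
  simp [lcmB, pyLcm, gcd_eq]

theorem pyGcd_eq_gcd : ∀ (n : Nat) (a b : Int), b.natAbs ≤ n → 0 < a → 0 ≤ b → pyGcd a b = Int.gcd a b := by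
  intro n
  induction n with
  | zero =>
    intro a b hn ha hb
    have hb0 : b = 0 := by omega
    rw [pyGcd, if_pos hb0, hb0, Int.gcd_zero_right, Int.natAbs_of_nonneg ha.le]
  | succ n ih =>
    intro a b hn ha hb
    rw [pyGcd]
    by_cases h : b = 0
    · rw [if_pos h, h, Int.gcd_zero_right, Int.natAbs_of_nonneg ha.le]
    · rw [if_neg h]
      have hbpos : 0 < b := lt_of_le_of_ne hb (Ne.symm h)
      have hmod : PySem.Int.mod a b = a % b := (PySem.Int.mod_eq_emod_of_pos (a := a) hbpos)
      have habs := pvModAbsLt a b h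
      rw [hmod]
      rw [ih b (a % b) (by omega) hbpos (Int.emod_nonneg a h)]
      rw [Int.gcd_comm b, Int.gcd_emod]

theorem pyLcm_eq_lcm (a b : Int) (ha : 0 < a) (hb : 0 < b) : pyLcm a b = Int.lcm a b := by
  have hg : pyGcd a b = Int.gcd a b := pyGcd_eq_gcd b.natAbs a b le_rfl ha hb.le
  have hgpos : (0:Int) < Int.gcd a b := by
    exact_mod_cast Int.gcd_pos_of_ne_zero_left b (by omega)
  rw [pyLcm, hg, PySem.Int.floordiv_eq_ediv_of_pos hgpos]
  have hmul : (Int.gcd a b : Int) * Int.lcm a b = a * b := by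
    calc ((Int.gcd a b : Int)) * Int.lcm a b = ((Int.gcd a b * Int.lcm a b : Nat) : Int) := by push_cast; ring
      _ = (((a*b).natAbs : Nat) : Int) := by rw [Int.gcd_mul_lcm]; simp [Int.natAbs_mul]
      _ = a * b := Int.natAbs_of_nonneg (by positivity)
  rw [← hmul, Int.mul_ediv_cancel_left _ (by omega)]

theorem gcd_fmod_gcd (a b : Int) : Int.gcd b (PySem.Int.mod a b) = Int.gcd a b := by
  have h : PySem.Int.mod a b = a + b * (-(Int.fdiv a b)) := by
    simp only [PySem.Int.mod, Int.fmod_def]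
    ring
  rw [h, Int.gcd_add_mul_left_right, Int.gcd_comm]

theorem pyGcd_signed : ∀ (n : Nat) (a b : Int), b.natAbs ≤ n → b ≠ 0 →
    pyGcd a b = (if b < 0 then -((Int.gcd a b : Nat) : Int) else ((Int.gcd a b : Nat) : Int)) := by
  intro n
  induction n with
  | zero => intro a b hn hb; exact absurd (by omega : b = 0) hb
  | succ n ih =>
    intro a b hn hb
    rw [pyGcd, if_neg hb]
    by_cases hm : PySem.Int.mod a b = 0
    · have hdvd : b ∣ a := (PySem.Int.mod_eq_zero_iff_dvd a b).mp hm
      rw [hm, pyGcd, if_pos rfl]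
      rw [Int.gcd_eq_natAbs_right_iff_dvd.mpr hdvd]
      rcases lt_or_gt_of_ne hb with h | h
      · rw [if_pos h]; omega
      · rw [if_neg (by omega)]; omega
    · have habs := pvModAbsLt a b hb
      rw [ih b (PySem.Int.mod a b) (by omega) hm, gcd_fmod_gcd]
      rcases lt_or_gt_of_ne hb with hbneg | hbpos
      · have hbd := PySem.Int.mod_neg_bounds a hbneg
        rw [if_pos (by omega), if_pos hbneg]
      · have h1 := PySem.Int.mod_nonneg a hbpos
        rw [if_neg (by omega), if_neg (by omega)]

theorem pyLcm_eq_lcm_gen (a b : Int) (h : 0 < a ∨ (a = 0 ∧ b ≠ 0)) :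
    pyLcm a b = Int.lcm a b := by
  rcases h with ha | ⟨ha, hb⟩
  · rcases lt_trichotomy b 0 with hb | hb | hb
    · have hg : pyGcd a b = -((Int.gcd a b : Nat) : Int) := by
        rw [pyGcd_signed b.natAbs a b le_rfl (by omega), if_pos hb]
      have hgpos : (0:Int) < Int.gcd a b := by
        exact_mod_cast Int.gcd_pos_of_ne_zero_left b (by omega)
      rw [pyLcm, hg, show a * b = -(a * (-b)) from by ring,
        show -((Int.gcd a b : Nat) : Int) = -(((Int.gcd a (-b) : Nat) : Int)) from by simp,
        PySem.Int.floordiv_neg_neg]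
      have hcore := pyLcm_eq_lcm a (-b) ha (by omega)
      rw [pyLcm, pyGcd_eq_gcd (-b).natAbs a (-b) le_rfl ha (by omega)] at hcore
      rw [hcore]
      simp [Int.lcm]
    · subst hb
      rw [pyLcm, pyGcd, if_pos rfl]
      simp [PySem.Int.floordiv]
    · exact pyLcm_eq_lcm a b ha hb
  · subst ha
    have hm : PySem.Int.mod 0 b = 0 := (PySem.Int.mod_eq_zero_iff_dvd 0 b).mpr (dvd_zero b)
    have hg : pyGcd 0 b = b := by
      rw [pyGcd, if_neg hb, hm, pyGcd, if_pos rfl]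
    rw [pyLcm, hg]
    simp [PySem.Int.floordiv]

theorem le_pyLcm_left (a b : Int) (ha : 0 < a) (hb : 0 < b) : a ≤ pyLcm a b := by
  rw [pyLcm_eq_lcm a b ha hb]
  have hpos : (0:Int) < Int.lcm a b := by
    exact_mod_cast Int.lcm_pos (by omega) (by omega)
  exact Int.le_of_dvd hpos (Int.dvd_lcm_left a b)

theorem foldl_pyLcm_zero (l : List Int) (h : ∀ y ∈ l, y ≠ 0) : l.foldl pyLcm 0 = 0 := by
  induction l with
  | nil => rfl
  | cons x l ih =>
    simp only [List.foldl_cons]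
    rw [pyLcm_eq_lcm_gen 0 x (Or.inr ⟨rfl, h x (by simp)⟩)]
    simpa using ih (fun y hy => h y (by simp [hy]))

theorem foldl_lcmF_zero (l : List Int) :
    l.foldl (fun a x => ((Int.lcm a x : Nat) : Int)) 0 = 0 := by
  induction l with
  | nil => rfl
  | cons x l ih =>
    simp only [List.foldl_cons]
    simpa using ih

theorem foldl_lcmF_nonneg (l : List Int) : ∀ (a0 : Int), 0 ≤ a0 →
    0 ≤ l.foldl (fun a x => ((Int.lcm a x : Nat) : Int)) a0 := by
  induction l with
  | nil => intro a0 h0; simpa using h0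
  | cons x l ih =>
    intro a0 _
    simp only [List.foldl_cons]
    exact ih _ (Int.natCast_nonneg _)

theorem foldl_pyLcm_eq_lcmF (l : List Int) : ∀ (a0 : Int), 0 < a0 → l.count 0 ≤ 1 →
    l.foldl pyLcm a0 = l.foldl (fun a x => ((Int.lcm a x : Nat) : Int)) a0 := by
  induction l with
  | nil => intro a0 _ _; rfl
  | cons x l ih =>
    intro a0 h0 hc
    simp only [List.foldl_cons]
    by_cases hx : x = 0
    · subst hx
      rw [pyLcm_eq_lcm_gen a0 0 (Or.inl h0)]
      have hz : ((Int.lcm a0 0 : Nat) : Int) = 0 := by simp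
      rw [hz]
      have hcz : l.count 0 = 0 := by
        simp at hc
        omega
      have hne : ∀ y ∈ l, y ≠ 0 := by
        intro y hy hy0
        subst hy0
        have := List.count_pos_iff.mpr hy
        omega
      rw [foldl_pyLcm_zero l hne, foldl_lcmF_zero l]
    · rw [pyLcm_eq_lcm_gen a0 x (Or.inl h0)]
      have hlp : (0:Int) < ((Int.lcm a0 x : Nat) : Int) := by
        exact_mod_cast Int.lcm_pos (by omega) hx
      have hcc : l.count 0 ≤ 1 := by
        simp [hx] at hc
        simpa using hc
      exact ih _ hlp hcc

theorem contains_ofList_eq (l : List Int) (x : Int) :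
    (PySem.Set.ofList l).contains x = decide (x ∈ l) := by
  by_cases h : x ∈ l
  · simp [h]
  · have hc : ¬ ((PySem.Set.ofList l).contains x = true) :=
      fun hc => h ((PySem.Set.mem_ofList l x).mp ((PySem.Set.contains_iff _ x).mp hc))
    simp only [h, decide_false]
    simpa using hc

-- A's negative list values wrap: slot written for e is (if e < 0 then e + 100001 else e)
def wrapv (e : Int) : Int := if e < 0 then e + 100001 else e

theorem pySetD_wrap (bl : List Bool) (e : Int) (h1 : -100001 ≤ e) (h2 : e ≤ 100000)
    (hlen : bl.length = 100001) :
    PySem.List.pySetD bl e true = PySem.List.pySetD bl (((wrapv e).toNat : Nat) : Int) true := by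
  rw [PySem.List.pySetD_natCast]
  by_cases h : e < 0
  · rw [wrapv, if_pos h]
    simp only [PySem.List.pySetD, PySem.List.pySet?, PySem.List.pyIdx?, hlen]
    rw [if_neg (by omega), if_pos (by push_cast; omega)]
    simp only [Option.map_some, Option.getD_some]
    congr 1
    omega
  · rw [wrapv, if_neg h, PySem.List.pySetD_of_nonneg _ _ (by omega)]

theorem wrapv_bounds (e : Int) (h1 : -100001 ≤ e) (h2 : e ≤ 100000) :
    0 ≤ wrapv e ∧ wrapv e ≤ 100000 := by
  unfold wrapv
  split <;> omega

-- the marking array after A's first loop reads back membership of the wrapped values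
theorem balls_getD (l : List Int) (hl : ∀ x ∈ l, -100001 ≤ x ∧ x ≤ 100000) :
    ∀ (bl : List Bool), bl.length = 100001 →
    ∀ i : Int, 0 ≤ i → i ≤ 100000 →
    PySem.List.pyGetD (l.foldl (fun b x => PySem.List.pySetD b x true) bl) i false
      = (PySem.List.pyGetD bl i false || decide (i ∈ l.map wrapv)) := by
  induction l with
  | nil => intro bl _ i _ _; simp
  | cons x l ih =>
    intro bl hlen i hi hi'
    have hx := hl x (by simp)
    have hwb := wrapv_bounds x hx.1 hx.2
    simp only [List.foldl_cons]
    rw [pySetD_wrap bl x hx.1 hx.2 hlen]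
    rw [ih (fun y hy => hl y (by simp [hy])) _
        (by rw [PySem.List.pySetD_natCast]; simp [hlen]) i hi hi']
    have hic : ((i.toNat : Nat) : Int) = i := Int.toNat_of_nonneg hi
    have hset := PySem.List.pyGetD_pySetD_natCast bl (wrapv x).toNat i.toNat true false (by omega)
    rw [hic] at hset
    rw [hset]
    by_cases h : i = wrapv x
    · subst h
      simp
    · have hne : ¬ (i.toNat = (wrapv x).toNat) := by omega
      rw [if_neg hne]
      simp [List.mem_cons, h]

theorem find?_congr_mem (p q : Int → Bool) (xs : List Int) (h : ∀ x ∈ xs, p x = q x) :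
    xs.find? p = xs.find? q := by
  induction xs with
  | nil => rfl
  | cons x xs ih =>
    rw [List.find?_cons, List.find?_cons, h x (by simp)]
    cases hq : q x
    · exact ih (fun y hy => h y (by simp [hy]))
    · rfl

theorem find?_pyRange_none (p : Int → Bool) (a b : Int)
    (h : (PySem.List.pyRange a b 1).find? p = none) : ∀ y, a ≤ y → y < b → p y = false := by
  rw [List.find?_eq_none] at h
  intro y h1 h2
  simpa using h y (PySem.List.mem_pyRange_one.mpr ⟨h1, h2⟩)

theorem find?_pyRange_some (p : Int → Bool) (a b x : Int)
    (h : (PySem.List.pyRange a b 1).find? p = some x) :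
    a ≤ x ∧ x < b ∧ p x = true ∧ ∀ y, a ≤ y → y < x → p y = false := by
  have hmem := List.mem_of_find?_eq_some h
  have hx := PySem.List.mem_pyRange_one.mp hmem
  have hpx := List.find?_some h
  refine ⟨hx.1, hx.2, hpx, ?_⟩
  rcases List.find?_eq_some_iff_append.mp h with ⟨-, as, bs, heq, hall⟩
  intro y h1 h2
  have hymem : y ∈ PySem.List.pyRange a b 1 := PySem.List.mem_pyRange_one.mpr ⟨h1, by omega⟩
  rw [heq] at hymem
  have hpair := PySem.List.pairwise_lt_pyRange_one a b
  rw [heq, List.pairwise_append] at hpair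
  rcases List.mem_append.mp hymem with hy | hy
  · simpa using hall y hy
  · rcases List.mem_cons.mp hy with rfl | hy
    · omega
    · have hlt : x < y := (List.pairwise_cons.mp hpair.2.1).1 y hy
      omega

theorem Pb_one (t aux : Int) (l : List Int) : Pb t aux l 1 = false := by
  simp [Pb, okB]

theorem smallLoop_inl (t aux : Int) (l : List Int) (x : Int)
    (hP : Pb t aux l x = true) (hsm : x * x ≤ t) :
    ∀ (n : Nat) (d : Int), (x - d).toNat = n → 1 ≤ d → d ≤ x →
    (∀ y, d ≤ y → y < x → Pb t aux l y = false) →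
    smallLoop t aux (PySem.Set.ofList l) d = .inl x := by
  intro n
  induction n with
  | zero =>
    intro d hn h1 h2 _
    have hdx : d = x := by omega
    subst hdx
    rw [smallLoop, dif_pos hsm]
    rw [show (PySem.Int.mod t d == 0 && okB t aux (PySem.Set.ofList l) d) = Pb t aux l d from rfl,
        hP]
    simp
  | succ n ih =>
    intro d hn h1 h2 hleast
    have hdx : d < x := by omega
    have hdt : d * d ≤ t := by nlinarith
    rw [smallLoop, dif_pos hdt]
    rw [show (PySem.Int.mod t d == 0 && okB t aux (PySem.Set.ofList l) d) = Pb t aux l d from rfl,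
        hleast d le_rfl hdx]
    exact ih (d + 1) (by omega) (by omega) (by omega) (fun y hy hy' => hleast y (by omega) hy')

theorem smallLoop_inr (t aux : Int) (l : List Int)
    (h : ∀ y, 1 ≤ y → y * y ≤ t → Pb t aux l y = false) :
    ∀ (n : Nat) (d : Int), (t + 1 - d).toNat = n → 1 ≤ d →
    (∀ e, 1 ≤ e → e < d → e * e ≤ t) →
    ∃ s, smallLoop t aux (PySem.Set.ofList l) d = .inr s ∧ 1 ≤ s ∧ t < s * s ∧
      (∀ e, 1 ≤ e → e < s → e * e ≤ t) := by
  intro n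
  induction n with
  | zero =>
    intro d hn h1 hinv
    have hd : t < d := by omega
    have hdt : ¬ (d * d ≤ t) := by nlinarith
    rw [smallLoop, dif_neg hdt]
    exact ⟨d, rfl, h1, by nlinarith, hinv⟩
  | succ n ih =>
    intro d hn h1 hinv
    by_cases hdt : d * d ≤ t
    · rw [smallLoop, dif_pos hdt]
      rw [show (PySem.Int.mod t d == 0 && okB t aux (PySem.Set.ofList l) d) = Pb t aux l d from rfl,
          h d h1 hdt]
      have hdle : d ≤ t := by nlinarith
      exact ih (d + 1) (by omega) (by omega)
        (fun e he he' => by rcases lt_or_ge e d with h' | h'; exact hinv e he h'; nlinarith)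
    · rw [smallLoop, dif_neg hdt]
      exact ⟨d, rfl, h1, by nlinarith, hinv⟩

theorem bigLoop_none (t aux : Int) (l : List Int) :
    ∀ (n : Nat) (d : Int), d.toNat = n →
    (∀ e, 1 ≤ e → e < d → bigCond t aux l e = false) →
    bigLoop t aux (PySem.Set.ofList l) d = none := by
  intro n
  induction n with
  | zero =>
    intro d hn _
    rw [bigLoop, dif_neg (by omega)]
  | succ n ih =>
    intro d hn hall
    by_cases hd : 1 < d
    · rw [bigLoop, dif_pos hd]
      rw [show (PySem.Int.mod t (d-1) == 0 && okB t aux (PySem.Set.ofList l) (PySem.Int.floordiv t (d-1)))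
            = bigCond t aux l (d-1) from rfl,
          hall (d-1) (by omega) (by omega)]
      exact ih (d-1) (by omega) (fun e he he' => hall e he (by omega))
    · rw [bigLoop, dif_neg hd]

theorem bigLoop_some (t aux : Int) (l : List Int) (e0 : Int)
    (he1 : 1 ≤ e0) (hc : bigCond t aux l e0 = true) :
    ∀ (n : Nat) (d : Int), d.toNat = n → e0 < d →
    (∀ e, e0 < e → e < d → bigCond t aux l e = false) →
    bigLoop t aux (PySem.Set.ofList l) d = some (PySem.Int.floordiv t e0) := by
  intro n
  induction n with
  | zero => intro d hn hd _; omega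
  | succ n ih =>
    intro d hn hd hall
    rw [bigLoop, dif_pos (by omega)]
    by_cases h : e0 = d - 1
    · rw [show (PySem.Int.mod t (d-1) == 0 && okB t aux (PySem.Set.ofList l) (PySem.Int.floordiv t (d-1)))
            = bigCond t aux l (d-1) from rfl, ← h, hc]
      simp
    · rw [show (PySem.Int.mod t (d-1) == 0 && okB t aux (PySem.Set.ofList l) (PySem.Int.floordiv t (d-1)))
            = bigCond t aux l (d-1) from rfl,
          hall (d-1) (by omega) (by omega)]
      exact ih (d-1) (by omega) (by omega) (fun e he he' => hall e he (by omega))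

theorem Pb_iff (t aux : Int) (l : List Int) (x : Int) :
    Pb t aux l x = true ↔ (x ∣ t ∧ 2 ≤ x ∧ x ∉ l ∧ pyLcm aux x = t) := by
  simp [Pb, okB, lcm_eq, PySem.Int.mod_eq_zero_iff_dvd]
  tauto

theorem okB_of_Pb (t aux : Int) (l : List Int) (x : Int) (h : Pb t aux l x = true) :
    okB t aux (PySem.Set.ofList l) x = true := by
  simp [Pb] at h
  exact h.2

theorem okB_false_of_Pb_false (t aux : Int) (l : List Int) (q : Int) (hdvd : q ∣ t)
    (h : Pb t aux l q = false) : okB t aux (PySem.Set.ofList l) q = false := by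
  simpa [Pb, PySem.Int.mod_eq_zero_iff_dvd, hdvd] using h

theorem cofactor_facts (t x : Int) (h2 : 2 ≤ x) (hxt : x ≤ t) (hdvd : x ∣ t) :
    1 ≤ t / x ∧ t = x * (t / x) ∧ t / (t / x) = x := by
  have hq : t / x * x = t := Int.ediv_mul_cancel hdvd
  have hq1 : 1 ≤ t / x := by rw [Int.le_ediv_iff_mul_le (by omega)]; omega
  have hte : t = x * (t / x) := by rw [mul_comm]; omega
  refine ⟨hq1, hte, ?_⟩
  have hc : x * (t / x) / (t / x) = x := Int.mul_ediv_cancel x (by omega)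
  rw [← hte] at hc
  exact hc

theorem foldA_split (l : List Int) :
    List.foldl (fun (st : Int × List Bool) x => (pyLcm st.1 x, PySem.List.pySetD st.2 x true))
      (1, List.replicate 100001 false) l
    = (List.foldl pyLcm 1 l,
       List.foldl (fun b x => PySem.List.pySetD b x true) (List.replicate 100001 false) l) :=
  PySem.List.foldl_prod_mk pyLcm (fun b x => PySem.List.pySetD b x true) l 1 _

-- A's result, under Pre_, is the first x in 2..t with x | t, x not in l, lcm(aux,x) = t
theorem A_eq (t : Int) (l : List Int)
    (hl : ∀ x ∈ l, -100001 ≤ x ∧ x ≤ 100000)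
    (hz : l.count 0 ≤ 1)
    (hneg : ∀ x ∈ l, x < 0 → t < x + 100001)
    (ht : t ≤ 100000 ∨ t < l.foldl pyLcm 1) :
    lowest_bounce_time_for_another_ball t l =
      (match (PySem.List.pyRange 2 (t + 1) 1).find? (Pb t (l.foldl pyLcm 1) l) with
        | some x => PySem.Int.toStr x
        | none => "impossivel") := by
  have hnonneg : 0 ≤ l.foldl pyLcm 1 := by
    rw [foldl_pyLcm_eq_lcmF l 1 one_pos hz]
    exact foldl_lcmF_nonneg l 1 (by omega)
  simp only [lowest_bounce_time_for_another_ball]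
  rw [foldA_split]
  by_cases hle : l.foldl pyLcm 1 ≤ t
  · rw [if_pos hle]
    have ht : t ≤ 100000 := by rcases ht with h | h; exact h; omega
    have hpred : (PySem.List.pyRange 2 (t + 1) 1).find? (fun x =>
          PySem.Int.mod t x == 0 &&
            !(PySem.List.pyGetD (l.foldl (fun b x => PySem.List.pySetD b x true)
                (List.replicate 100001 false)) x false) && pyLcm (l.foldl pyLcm 1) x == t)
        = (PySem.List.pyRange 2 (t + 1) 1).find? (Pb t (l.foldl pyLcm 1) l) := by
      apply find?_congr_mem
      intro x hx
      have hxr := PySem.List.mem_pyRange_one.mp hx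
      have hgd := balls_getD l hl (List.replicate 100001 false)
        (by rw [List.length_replicate]) x (by omega) (by omega)
      have hrep : PySem.List.pyGetD (List.replicate 100001 false) x false = false := by
        rw [PySem.List.pyGetD_eq_getElem _ _ (by omega)
          (by rw [List.length_replicate]; omega)]
        exact List.getElem_replicate _
      rw [hrep] at hgd
      simp only [Bool.false_or] at hgd
      have hmm : (x ∈ l.map wrapv) ↔ x ∈ l := by
        constructor
        · intro hxm
          rcases List.mem_map.mp hxm with ⟨e, he, hwe⟩
          unfold wrapv at hwe
          split at hwe
          · have := hneg e he (by assumption)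
            omega
          · exact hwe ▸ he
        · intro hxl
          exact List.mem_map.mpr ⟨x, hxl, by unfold wrapv; rw [if_neg (by omega)]⟩
      rw [show (decide (x ∈ l.map wrapv)) = decide (x ∈ l) from by simp [hmm]] at hgd
      simp only [hgd, Pb, okB, contains_ofList_eq, lcm_eq]
      simp [show (2:Int) ≤ x from hxr.1, Bool.and_assoc]
    rw [hpred]
    cases hf : (PySem.List.pyRange 2 (t + 1) 1).find? (Pb t (l.foldl pyLcm 1) l) with
    | none => simp
    | some x =>
      obtain ⟨h2x, -, -, -⟩ := find?_pyRange_some _ _ _ _ hf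
      simp [show ¬(x = 0) by omega]
  · rw [if_neg hle]
    cases hf : (PySem.List.pyRange 2 (t + 1) 1).find? (Pb t (l.foldl pyLcm 1) l) with
    | none => rfl
    | some x =>
      obtain ⟨h2x, -, hPx, -⟩ := find?_pyRange_some _ _ _ _ hf
      obtain ⟨-, -, -, hlcm⟩ := (Pb_iff _ _ _ _).mp hPx
      rcases eq_or_lt_of_le hnonneg with h0 | h0
      · rw [pyLcm_eq_lcm_gen (l.foldl pyLcm 1) x (Or.inr ⟨h0.symm, by omega⟩)] at hlcm
        rw [← h0] at hlcm
        simp at hlcm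
        omega
      · have := le_pyLcm_left (l.foldl pyLcm 1) x h0 (by omega)
        omega

-- B's divisor enumeration returns the same first qualifying x
theorem B_eq (t : Int) (l : List Int) :
    lowest_bounce_time_for_another_ball_alt t l =
      (match (PySem.List.pyRange 2 (t + 1) 1).find? (Pb t (l.foldl pyLcm 1) l) with
        | some x => PySem.Int.toStr x
        | none => "impossivel") := by
  unfold lowest_bounce_time_for_another_ball_alt
  dsimp only
  rw [show (fun (a x : Int) => lcmB a x) = pyLcm from funext fun a => funext fun x => lcm_eq a x]
  set aux := l.foldl pyLcm 1 with haux
  cases hf : (PySem.List.pyRange 2 (t + 1) 1).find? (Pb t aux l) with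
  | none =>
    have hall := find?_pyRange_none _ _ _ hf
    have hsmallP : ∀ y, 1 ≤ y → y * y ≤ t → Pb t aux l y = false := by
      intro y h1 h2
      rcases eq_or_lt_of_le h1 with h | h
      · rw [← h]; exact Pb_one t aux l
      · exact hall y (by omega) (by nlinarith)
    obtain ⟨s, hs, hs1, hst, hsinv⟩ := smallLoop_inr t aux l hsmallP _ 1 rfl le_rfl (by omega)
    have hbc : ∀ e, 1 ≤ e → e < s → bigCond t aux l e = false := by
      intro e he1 hes
      have heet := hsinv e he1 hes
      by_cases hed : e ∣ t
      · have ht1 : 1 ≤ t := by nlinarith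
        have hq : t / e * e = t := Int.ediv_mul_cancel hed
        have hq1 : 1 ≤ t / e := by rw [Int.le_ediv_iff_mul_le (by omega)]; nlinarith
        have hqt : t / e ≤ t := Int.ediv_le_self e (by omega)
        have hfl : PySem.Int.floordiv t e = t / e :=
          PySem.Int.floordiv_eq_ediv_of_pos (by omega)
        rcases eq_or_lt_of_le hq1 with h1 | h1
        · simp [bigCond, hfl, ← h1, okB]
        · have hqdvd : t / e ∣ t := ⟨e, hq.symm⟩
          have hPq : Pb t aux l (t / e) = false := hall (t / e) (by omega) (by omega)
          simp [bigCond, hfl, okB_false_of_Pb_false t aux l (t / e) hqdvd hPq]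
      · have hmz : ¬ (PySem.Int.mod t e = 0) :=
          fun hh => hed ((PySem.Int.mod_eq_zero_iff_dvd t e).mp hh)
        simp [bigCond, hmz]
    rw [hs]
    dsimp only
    rw [bigLoop_none t aux l s.toNat s rfl hbc]
  | some x =>
    obtain ⟨h2x, hxlt, hPx, hleast0⟩ := find?_pyRange_some _ _ _ _ hf
    have hleast : ∀ y, 1 ≤ y → y < x → Pb t aux l y = false := by
      intro y h1 h2
      rcases eq_or_lt_of_le h1 with h | h
      · rw [← h]; exact Pb_one t aux l
      · exact hleast0 y (by omega) h2
    obtain ⟨hxdvd, -, -, hlcmx⟩ := (Pb_iff _ _ _ _).mp hPx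
    have hxt : x ≤ t := by omega
    have ht1 : 1 ≤ t := by omega
    by_cases hsm : x * x ≤ t
    · rw [smallLoop_inl t aux l x hPx hsm (x - 1).toNat 1 rfl (by omega) (by omega) hleast]
    · have hsmallP : ∀ y, 1 ≤ y → y * y ≤ t → Pb t aux l y = false := by
        intro y h1 h2
        have hyx : y < x := by nlinarith
        exact hleast y h1 hyx
      obtain ⟨s, hs, hs1, hst, hsinv⟩ := smallLoop_inr t aux l hsmallP _ 1 rfl le_rfl (by omega)
      obtain ⟨he01, hte, htdiv⟩ := cofactor_facts t x h2x hxt hxdvd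
      have he0dvd : t / x ∣ t := ⟨x, by linarith [hte]⟩
      have hfl : PySem.Int.floordiv t (t / x) = x := by
        rw [PySem.Int.floordiv_eq_ediv_of_pos (by omega)]; exact htdiv
      have hce0 : bigCond t aux l (t / x) = true := by
        simp [bigCond, PySem.Int.mod_eq_zero_iff_dvd, he0dvd, hfl, okB_of_Pb t aux l x hPx]
      have he0x : t / x < x := by nlinarith
      have he0s : t / x < s := by
        have h2 : (t / x) * (t / x) ≤ t := by nlinarith
        nlinarith [hst, hs1, he01]
      have hmax : ∀ e, t / x < e → e < s → bigCond t aux l e = false := by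
        intro e hee0 hes
        have he1 : 1 ≤ e := by omega
        have heet := hsinv e he1 hes
        by_cases hed : e ∣ t
        · have hq : t / e * e = t := Int.ediv_mul_cancel hed
          have hq1 : 1 ≤ t / e := by rw [Int.le_ediv_iff_mul_le (by omega)]; nlinarith
          have hfl2 : PySem.Int.floordiv t e = t / e :=
            PySem.Int.floordiv_eq_ediv_of_pos (by omega)
          have hqx : t / e < x := by
            nlinarith [hq, hte, he01]
          rcases eq_or_lt_of_le hq1 with h1 | h1
          · simp [bigCond, hfl2, ← h1, okB]
          · have hqdvd : t / e ∣ t := ⟨e, hq.symm⟩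
            have hPq : Pb t aux l (t / e) = false := hleast (t / e) (by omega) hqx
            simp [bigCond, hfl2, okB_false_of_Pb_false t aux l (t / e) hqdvd hPq]
        · have hmz : ¬ (PySem.Int.mod t e = 0) :=
            fun hh => hed ((PySem.Int.mod_eq_zero_iff_dvd t e).mp hh)
          simp [bigCond, hmz]
      rw [hs]
      dsimp only
      rw [bigLoop_some t aux l (t / x) he01 hce0 s.toNat s rfl he0s hmax, hfl]

-- ===== VERDICT (by name: the statement is the Claim_ definition above) =====
theorem lowest_bounce_time_for_another_ball_spec : Claim_equal_lowest_bounce_time_for_another_ball := by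
  intro t l _ hpre
  unfold Spec_lowest_bounce_time_for_another_ball
  obtain ⟨hel, hz, hdisj⟩ := hpre
  have hl : ∀ x ∈ l, -100001 ≤ x ∧ x ≤ 100000 := fun x hx => ⟨(hel x hx).1, (hel x hx).2.1⟩
  have hneg : ∀ x ∈ l, x < 0 → t < x + 100001 := fun x hx => (hel x hx).2.2
  have hcase : t ≤ 100000 ∨ t < l.foldl pyLcm 1 := by
    rcases hdisj with h | h
    · exact Or.inl h
    · exact Or.inr (by rw [foldl_pyLcm_eq_lcmF l 1 one_pos hz]; exact h)
  rw [A_eq t l hl hz hneg hcase, B_eq t l]
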